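-- pv_equiv track=rewrite | github.com/mmore500/iterpop | iterpop/iterpop.py | pophomogeneous
-- ===== SOURCE A (Python) =====
-- from collections.abc import Iterable
-- from itertools import tee
--
-- def _iterable(obj):
--     '''
--     Is obj iterable?
--     '''
--     return isinstance(obj, Iterable)
--
-- def _pairwise(iterable):
--     '''
--     s -> (s0,s1), (s1,s2), (s2, s3), ...
--     '''
--     a, b = tee(iterable)
--     next(b, None)
--     return zip(a, b)
--
-- def pophomogeneous(
--     container,
--     catch_empty=False,
--     catch_heterogeneous=False,
--     default=None,
-- ):
--     '''
--     Extract the value of a homogeneous iterator.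
--     Raise exceptions or return default value if iterator is not homogeneous.
--     '''
--
--     if not _iterable(container):
--         raise TypeError(container, 'is not iterable')
--
--     handle1, handle2, handle3 = tee(container, 3)
--     res = default
--     not_empty = any(True for _ in handle1)
--     is_empty = not not_empty
--
--     if is_empty and (not catch_empty):
--         raise ValueError(container, 'is empty')
--     elif not_empty and all(
--         a == b
--         for a, b in _pairwise(handle2)
--     ):
--         res = next(handle3)
--     elif not_empty and (not catch_heterogeneous):
--         raise ValueError(container, 'is heterogeneous')
--
--     return res
-- ===== SOURCE B (Python) =====
-- from collections.abc import Iterable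
--
-- def pophomogeneous(
--     container,
--     catch_empty=False,
--     catch_heterogeneous=False,
--     default=None,
-- ):
--     '''
--     Extract the value of a homogeneous iterator.
--     Raise exceptions or return default value if iterator is not homogeneous.
--     '''
--     if not isinstance(container, Iterable):
--         raise TypeError(container, 'is not iterable')
--
--     it = iter(container)
--     try:
--         first = next(it)
--     except StopIteration:
--         if catch_empty:
--             return default
--         raise ValueError(container, 'is empty')
--
--     prev = first
--     homogeneous = True
--     for cur in it:
--         if cur != prev:
--             homogeneous = False
--         prev = cur
--
--     if homogeneous:
--         return first
--     if catch_heterogeneous: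
--         return default
--     raise ValueError(container, 'is heterogeneous')
-- ===== Notes on version B (the rewrite author's own statement) =====
-- stated objective: simpler
-- what changed: Single pass over one iterator with a prev/homogeneous-flag accumulator instead of three tee handles, an any() emptiness scan and a pairwise zip generator.
import Mathlib
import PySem

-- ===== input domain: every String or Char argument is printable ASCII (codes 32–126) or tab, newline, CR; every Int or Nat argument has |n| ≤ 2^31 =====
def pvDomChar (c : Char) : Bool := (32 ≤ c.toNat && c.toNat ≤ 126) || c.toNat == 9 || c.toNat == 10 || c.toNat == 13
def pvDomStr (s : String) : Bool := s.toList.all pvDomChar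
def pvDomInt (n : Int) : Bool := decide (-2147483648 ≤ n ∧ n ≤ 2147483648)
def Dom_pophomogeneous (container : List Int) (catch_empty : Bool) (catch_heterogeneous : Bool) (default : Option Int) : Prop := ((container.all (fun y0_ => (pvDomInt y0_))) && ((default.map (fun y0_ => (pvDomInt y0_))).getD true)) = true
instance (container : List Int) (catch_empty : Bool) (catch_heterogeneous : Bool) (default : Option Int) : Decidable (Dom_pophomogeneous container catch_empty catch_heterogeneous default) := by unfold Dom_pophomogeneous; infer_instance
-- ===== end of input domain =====

-- B replaces A's three tee handles, any() emptiness scan and pairwise-zip generator with one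
-- single pass keeping a prev value and a homogeneity flag (objective: simpler).


-- ===== PORT A =====
-- Literal port of A: `any(True for _ in handle1)` is the emptiness test, `_pairwise(handle2)`
-- is the zip of the list with its tail, `next(handle3)` is the first element.
-- Where the Python raises (ValueError), the port returns `none`; Pre_ excludes those inputs.
def pophomogeneous (container : List Int) (catch_empty : Bool) (catch_heterogeneous : Bool) (default : Option Int) : Option Int :=
  let res := default
  let not_empty := !container.isEmpty
  let is_empty := !not_empty
  if is_empty && !catch_empty then none  -- raise ValueError(container, 'is empty')
  else if not_empty && (container.zip container.tail).all (fun p => p.1 == p.2) then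
    container.head?  -- res = next(handle3)
  else if not_empty && !catch_heterogeneous then none  -- raise ValueError(container, 'is heterogeneous')
  else res

-- ===== PORT B =====
-- B's for-loop over the remaining elements: state (prev, homogeneous flag).
def altLoop : Int → Bool → List Int → Int × Bool
  | prev, homog, [] => (prev, homog)
  | prev, homog, cur :: rest => altLoop cur (if cur != prev then false else homog) rest

def pophomogeneous_alt (container : List Int) (catch_empty : Bool) (catch_heterogeneous : Bool) (default : Option Int) : Option Int :=
  match container with
  | [] =>  -- next(it) raised StopIteration
    if catch_empty then default
    else none  -- raise ValueError(container, 'is empty')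
  | first :: rest =>
    let st := altLoop first true rest
    if st.2 then first
    else if catch_heterogeneous then default
    else none  -- raise ValueError(container, 'is heterogeneous')

-- ===== PRECONDITION & SPEC =====
-- Pre_ excludes exactly the inputs where the Python A raises ValueError: an empty container
-- without catch_empty, and a non-homogeneous container without catch_heterogeneous.
def Pre_pophomogeneous (container : List Int) (catch_empty : Bool) (catch_heterogeneous : Bool) (default : Option Int) : Prop :=
  (container = [] → catch_empty = true) ∧
  (container.IsChain (· = ·) ∨ catch_heterogeneous = true)
instance (container : List Int) (catch_empty : Bool) (catch_heterogeneous : Bool) (default : Option Int) : Decidable (Pre_pophomogeneous container catch_empty catch_heterogeneous default) := by unfold Pre_pophomogeneous; infer_instance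
def pvWitness_pophomogeneous : List Int × Bool × Bool × Option Int := ([3, 3, 3], false, false, none)
def Spec_pophomogeneous (container : List Int) (catch_empty : Bool) (catch_heterogeneous : Bool) (default : Option Int) (out : Option Int) : Prop := out = pophomogeneous_alt container catch_empty catch_heterogeneous default
instance (container : List Int) (catch_empty : Bool) (catch_heterogeneous : Bool) (default : Option Int) (out : Option Int) : Decidable (Spec_pophomogeneous container catch_empty catch_heterogeneous default out) := by unfold Spec_pophomogeneous; infer_instance

-- ===== CLAIM (what is proved, stated in full; the proofs are below) =====
def Claim_equal_pophomogeneous : Prop := ∀ (container : List Int) (catch_empty : Bool) (catch_heterogeneous : Bool) (default : Option Int), Dom_pophomogeneous container catch_empty catch_heterogeneous default → Pre_pophomogeneous container catch_empty catch_heterogeneous default → Spec_pophomogeneous container catch_empty catch_heterogeneous default (pophomogeneous container catch_empty catch_heterogeneous default)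

-- ===== LEMMAS AND PROOFS =====
-- B's flag after the loop equals A's pairwise-all test, for any start state.
theorem altLoop_snd (l : List Int) : ∀ (prev : Int) (homog : Bool),
    (altLoop prev homog l).2 = (homog && ((prev :: l).zip l).all (fun p => p.1 == p.2)) := by
  induction l with
  | nil => intro prev homog; simp [altLoop]
  | cons c rest ih =>
    intro prev homog
    simp only [altLoop, ih, List.zip_cons_cons, List.all_cons]
    by_cases h : c = prev
    · subst h; simp [Bool.and_assoc]
    · have h2 : (prev == c) = false := by simp [Ne.symm h]
      simp [h, h2, bne_iff_ne]

-- ===== VERDICT (by name: the statement is the Claim_ definition above) =====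
theorem pophomogeneous_spec : Claim_equal_pophomogeneous := by
  intro container catch_empty catch_heterogeneous default _ _
  show _ = _
  cases container with
  | nil => cases catch_empty <;> simp [pophomogeneous, pophomogeneous_alt]
  | cons h t =>
    simp only [pophomogeneous, pophomogeneous_alt, altLoop_snd, List.isEmpty_cons,
      Bool.not_false, Bool.true_and, Bool.and_false, Bool.false_and, if_false,
      List.tail_cons, List.head?_cons, Bool.true_and]
    by_cases hall : ((h :: t).zip t).all (fun p => p.1 == p.2) = true
    · simp [hall]
    · simp [hall]
      cases catch_heterogeneous <;> simp
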